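-- pv_equiv track=rewrite | github.com/sravya888/CP_practice | 10-isrotation-Python/isrotation.py | isrotation
-- ===== SOURCE A (Python) =====
-- def isrotation(x, y):
-- 	s=str(x)
-- 	r=str(y)
-- 	n=len(s)
-- 	if s==r[::-1]:
-- 		return True
--
-- 	for i in range(n):
-- 		x=s[i:n]+s[0:i]
--
-- 		z=s[-i::]+s[:n-i]
--
-- 		if x==r or z==r:
--
--
-- 			return True
--
-- 	return False
-- ===== SOURCE B (Python) =====
-- def isrotation(x, y):
--     s = str(x)
--     r = str(y)
--     if s == r[::-1]:
--         return True
--     return len(s) == len(r) and r in s + s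
-- ===== Notes on version B (the rewrite author's own statement) =====
-- stated objective: faster
-- what changed: Replaces the O(n^2) loop that builds and compares every rotation with a single substring test 'r in s+s' guarded by a length check (plus the same reverse check).
-- intended difference: On inputs with x nonempty and y equal to x concatenated with itself, A returns True (its i=0 slice s[-0:] accidentally compares the doubled string s+s against r), while B returns False; y of twice the length is not a rotation or reverse of x, so False is the intended value. — e.g. on isrotation("ab", "abab"): A returns true, B returns false
import Mathlib
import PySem

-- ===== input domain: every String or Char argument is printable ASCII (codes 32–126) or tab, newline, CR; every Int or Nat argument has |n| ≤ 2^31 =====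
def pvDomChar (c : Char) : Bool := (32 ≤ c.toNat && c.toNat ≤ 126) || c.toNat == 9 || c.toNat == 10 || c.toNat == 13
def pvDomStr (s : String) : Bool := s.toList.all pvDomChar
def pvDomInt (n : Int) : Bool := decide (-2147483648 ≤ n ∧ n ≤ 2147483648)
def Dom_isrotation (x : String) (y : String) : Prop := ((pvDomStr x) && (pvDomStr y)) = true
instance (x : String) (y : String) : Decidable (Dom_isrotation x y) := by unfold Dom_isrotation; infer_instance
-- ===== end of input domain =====

-- B replaces A's quadratic rotation-enumeration loop with a length check plus a single
-- substring test 'r in s+s' (faster: asymptotic); on x ≠ "" with y = x+x, A accidentally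
-- returns True (its i=0 slice compares s+s against r) while B returns False (see D_).

-- ===== PORT A =====
def isrotation (x : String) (y : String) : Bool :=
  let s := x.toList                     -- s = str(x)
  let r := y.toList                     -- r = str(y)
  let n := s.length                     -- n = len(s)
  if s = (PySem.List.slice? r none none (-1)).getD [] then  -- if s == r[::-1]
    true
  else
    -- for i in range(n): x = s[i:n]+s[0:i]; z = s[-i::]+s[:n-i]; if x==r or z==r: return True
    (PySem.List.pyRange 0 (n : Int) 1).any (fun i =>
      let xr := PySem.List.slice s (some i) (some (n : Int)) ++ PySem.List.slice s (some 0) (some i)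
      let z := PySem.List.slice s (some (-i)) none ++ PySem.List.slice s none (some ((n : Int) - i))
      (xr == r) || (z == r))

-- ===== PORT B =====
def isrotation_alt (x : String) (y : String) : Bool :=
  let s := x.toList                     -- s = str(x)
  let r := y.toList                     -- r = str(y)
  if s = r.reverse then                 -- if s == r[::-1]
    true
  else                                  -- return len(s) == len(r) and r in s + s
    (s.length == r.length) && PySem.Chars.isIn r (s ++ s)

-- ===== PRECONDITION & SPEC =====
-- On x ≠ "" with y = x ++ x, A returns True (its i=0 slice s[-0:] makes it compare the
-- doubled string s+s with r) while B returns False; y of twice x's length is neither a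
-- rotation nor the reverse of x, so False is the intended value.
def D_isrotation (x : String) (y : String) : Prop := x ≠ "" ∧ y = x ++ x
instance (x : String) (y : String) : Decidable (D_isrotation x y) := by unfold D_isrotation; infer_instance

def Spec_isrotation (x : String) (y : String) (out : Bool) : Prop := ¬ D_isrotation x y → out = isrotation_alt x y
instance (x : String) (y : String) (out : Bool) : Decidable (Spec_isrotation x y out) := by unfold Spec_isrotation; infer_instance

def pvDiffWitness_isrotation : String × String := ("ab", "abab")
def pvDiffWitnessOut_isrotation : Bool × Bool := (true, false)

-- ===== CLAIM (what is proved, stated in full; the proofs are below) =====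
def Claim_unchanged_isrotation : Prop := ∀ (x : String) (y : String), Dom_isrotation x y → Spec_isrotation x y (isrotation x y)
def Claim_changed_isrotation : Prop := Dom_isrotation (pvDiffWitness_isrotation.1) (pvDiffWitness_isrotation.2) ∧ D_isrotation (pvDiffWitness_isrotation.1) (pvDiffWitness_isrotation.2) ∧ isrotation (pvDiffWitness_isrotation.1) (pvDiffWitness_isrotation.2) = pvDiffWitnessOut_isrotation.1 ∧ isrotation_alt (pvDiffWitness_isrotation.1) (pvDiffWitness_isrotation.2) = pvDiffWitnessOut_isrotation.2 ∧ pvDiffWitnessOut_isrotation.1 ≠ pvDiffWitnessOut_isrotation.2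
def Claim_exact_isrotation : Prop := ∀ (x : String) (y : String), Dom_isrotation x y → D_isrotation x y → isrotation x y ≠ isrotation_alt x y

-- ===== LEMMAS AND PROOFS =====

-- a rotation (drop k ++ take k) is an infix of the doubled list
lemma rot_infix_double (s : List Char) (k : Nat) :
    s.drop k ++ s.take k <:+: s ++ s := by
  refine ⟨s.take k, s.drop k, ?_⟩
  simp only [← List.append_assoc]
  rw [List.take_append_drop, List.append_assoc, List.take_append_drop]

-- an infix of s ++ s of the same length as s is a rotation of s
lemma infix_double_rot (s r : List Char) (hlen : r.length = s.length)
    (hinf : r <:+: s ++ s) : ∃ k ≤ s.length, s.drop k ++ s.take k = r := by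
  obtain ⟨pre, suf, h⟩ := hinf
  have hL := congrArg List.length h
  simp only [List.length_append] at hL
  have hk : pre.length ≤ s.length := by omega
  refine ⟨pre.length, hk, ?_⟩
  have h1 : (s ++ s).drop pre.length = r ++ suf := by
    rw [← h, List.append_assoc, List.drop_left]
  have h2 : (s ++ s).drop pre.length = s.drop pre.length ++ s :=
    List.drop_append_of_le_length hk
  have h3 : (s.drop pre.length ++ s).take s.length = r := by
    rw [← h2, h1, ← hlen, List.take_left]
  have h5 : (s.drop pre.length).take s.length = s.drop pre.length :=
    List.take_of_length_le (by simp only [List.length_drop]; omega)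
  have h4 : s.length - (s.drop pre.length).length = pre.length := by
    simp only [List.length_drop]; omega
  rw [← h3, List.take_append, h5, h4]

lemma xr_eval (s : List Char) (k : Nat) :
    PySem.List.slice s (some (k : Int)) (some (s.length : Int)) ++
      PySem.List.slice s (some 0) (some (k : Int)) = s.drop k ++ s.take k := by
  rw [PySem.List.slice_natCast]
  simp [PySem.List.slice_to_natCast, List.take_of_length_le]

lemma z_eval (s : List Char) (k : Nat) (h1 : 0 < k) (hk : k ≤ s.length) :
    PySem.List.slice s (some (-(k : Int))) none ++
      PySem.List.slice s none (some ((s.length : Int) - (k : Int))) =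
    s.drop (s.length - k) ++ s.take (s.length - k) := by
  rw [PySem.List.slice_from_neg_natCast s k h1]
  have h2 : ((s.length : Int) - (k : Int)) = ((s.length - k : Nat) : Int) := by omega
  rw [h2, PySem.List.slice_to_natCast]

-- A's loop body at index k, viewed as a Prop
lemma body_iff (s r : List Char) (k : Nat) (hk : k < s.length) :
    ((PySem.List.slice s (some (k : Int)) (some (s.length : Int)) ++ PySem.List.slice s (some 0) (some (k : Int)) == r) ||
     (PySem.List.slice s (some (-(k : Int))) none ++ PySem.List.slice s none (some ((s.length : Int) - (k : Int))) == r)) = true ↔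
    (s.drop k ++ s.take k = r ∨
      (if k = 0 then s ++ s = r
       else s.drop (s.length - k) ++ s.take (s.length - k) = r)) := by
  rw [xr_eval]
  by_cases hz : k = 0
  · subst hz
    have hfrom : PySem.List.slice s (some (-((0 : Nat) : Int))) none = s := by
      simp
    have hto : PySem.List.slice s none (some ((s.length : Int) - ((0 : Nat) : Int))) = s := by
      have : ((s.length : Int) - ((0 : Nat) : Int)) = ((s.length : Nat) : Int) := by omega
      rw [this, PySem.List.slice_to_natCast, List.take_of_length_le le_rfl]
    rw [hfrom, hto]
    simp
  · rw [z_eval s k (by omega) (by omega)]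
    simp [hz]

lemma main_equiv (x y : String) (hD : ¬ D_isrotation x y) :
    isrotation x y = isrotation_alt x y := by
  unfold isrotation isrotation_alt
  simp only [PySem.List.slice?_none_none_neg_one, Option.getD_some]
  by_cases hrev : x.toList = y.toList.reverse
  · simp [hrev]
  · simp only [if_neg hrev]
    set s := x.toList with hs
    set r := y.toList with hr
    have hD' : ¬ (s ≠ [] ∧ r = s ++ s) := by
      rintro ⟨h1, h2⟩
      exact hD ⟨by simpa [← String.toList_eq_nil_iff] using h1,
        String.toList_inj.mp (by rw [String.toList_append, ← hs, ← hr, h2])⟩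
    rw [Bool.eq_iff_iff]
    simp only [List.any_eq_true, Bool.and_eq_true, beq_iff_eq, PySem.Chars.isIn_iff_infix]
    constructor
    · rintro ⟨i, hmem, hbody⟩
      obtain ⟨h0, hi⟩ := PySem.List.mem_pyRange_one.mp hmem
      have hik : i = ((i.toNat : Nat) : Int) := by omega
      rw [hik] at hbody
      rw [body_iff s r i.toNat (by omega)] at hbody
      rcases hbody with h | h
      · refine ⟨?_, h ▸ rot_infix_double s i.toNat⟩
        rw [← h]; simp only [List.length_append, List.length_take, List.length_drop]; omega
      · by_cases hz : i.toNat = 0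
        · rw [if_pos hz] at h
          have hne : s ≠ [] := by
            intro hnil
            rw [hnil] at hi; simp at hi; omega
          exact absurd ⟨hne, h.symm⟩ hD'
        · rw [if_neg hz] at h
          refine ⟨?_, h ▸ rot_infix_double s (s.length - i.toNat)⟩
          rw [← h]; simp only [List.length_append, List.length_take, List.length_drop]; omega
    · rintro ⟨hlen, hinf⟩
      have hn : s.length ≠ 0 := by
        intro h0
        apply hrev
        have h1 : s = [] := List.length_eq_zero_iff.mp h0
        have h2 : r = [] := List.length_eq_zero_iff.mp (by omega)
        rw [h1, h2]; rfl
      obtain ⟨k, hk, hrot⟩ := infix_double_rot s r hlen.symm hinf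
      by_cases hkn : k = s.length
      · refine ⟨((0 : Nat) : Int), PySem.List.mem_pyRange_one.mpr ⟨by omega, by omega⟩, ?_⟩
        rw [body_iff s r 0 (by omega)]
        left
        have hsr : s = r := by
          rw [hkn] at hrot
          simpa using hrot
        simp [hsr]
      · refine ⟨((k : Nat) : Int), PySem.List.mem_pyRange_one.mpr ⟨by omega, by omega⟩, ?_⟩
        rw [body_iff s r k (by omega)]
        exact Or.inl hrot

lemma A_true_on_D (x y : String) (hD : D_isrotation x y) : isrotation x y = true := by
  obtain ⟨hne, hxx⟩ := hD
  unfold isrotation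
  simp only [PySem.List.slice?_none_none_neg_one, Option.getD_some]
  have hsne : x.toList ≠ [] := by simpa [← String.toList_eq_nil_iff] using hne
  have hpos : 0 < x.toList.length := List.length_pos_iff.mpr hsne
  have hry : y.toList = x.toList ++ x.toList := by rw [hxx, String.toList_append]
  have hrev : x.toList ≠ y.toList.reverse := by
    intro h
    have hL : x.toList.length = y.toList.reverse.length := congrArg List.length h
    rw [hry] at hL
    simp only [List.length_reverse, List.length_append] at hL
    omega
  rw [if_neg hrev]
  simp only [List.any_eq_true]
  refine ⟨((0 : Nat) : Int), PySem.List.mem_pyRange_one.mpr ⟨by omega, by omega⟩, ?_⟩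
  rw [body_iff x.toList y.toList 0 (by omega)]
  right
  rw [if_pos rfl, hry]

lemma B_false_on_D (x y : String) (hD : D_isrotation x y) : isrotation_alt x y = false := by
  obtain ⟨hne, hxx⟩ := hD
  unfold isrotation_alt
  have hsne : x.toList ≠ [] := by simpa [← String.toList_eq_nil_iff] using hne
  have hpos : 0 < x.toList.length := List.length_pos_iff.mpr hsne
  have hry : y.toList = x.toList ++ x.toList := by rw [hxx, String.toList_append]
  have hrev : x.toList ≠ y.toList.reverse := by
    intro h
    have hL : x.toList.length = y.toList.reverse.length := congrArg List.length h
    rw [hry] at hL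
    simp only [List.length_reverse, List.length_append] at hL
    omega
  rw [if_neg hrev]
  simp [hry]
  exact fun h => absurd h hne

-- ===== VERDICT (by name: the statement is the Claim_ definition above) =====
theorem isrotation_spec : Claim_unchanged_isrotation := by
  intro x y _ hD
  exact main_equiv x y hD

theorem isrotation_changed : Claim_changed_isrotation := by
  unfold Claim_changed_isrotation; decide

theorem isrotation_tight : Claim_exact_isrotation := by
  intro x y _ hD
  rw [A_true_on_D x y hD, B_false_on_D x y hD]
  simp
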